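-- pv_equiv track=rewrite | github.com/s-matysik/EmbedSLR_v2.0 | embedslr/multi_embedding.py | count_shared_and_unique
-- ===== SOURCE A (Python) =====
-- from typing import Dict, List, Set, Tuple, Any
--
-- def count_shared_and_unique(
--     model_selections: Dict[str, Set[Any]],
--     model_name: str
-- ) -> Tuple[int, int]:
--     """
--     Counts shared and unique publications for a given model.
--
--     Parameters
--     ----------
--     model_selections : Dict[str, Set[Any]]
--         Dictionary mapping model names to sets of selected publication IDs
--     model_name : str
--         Name of the model to analyze
--
--     Returns
--     -------
--     Tuple[int, int]
--         (number of shared publications, number of unique publications)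
--     """
--     current = model_selections[model_name]
--     other_models = [s for name, s in model_selections.items() if name != model_name]
--
--     if not other_models:
--         return 0, len(current)
--
--     all_others = set().union(*other_models)
--     shared = len(current & all_others)
--     unique = len(current - all_others)
--
--     return shared, unique
-- ===== SOURCE B (Python) =====
-- def count_shared_and_unique(model_selections, model_name):
--     current = model_selections[model_name]
--     other_models = [s for name, s in model_selections.items() if name != model_name]
--     shared = 0
--     unique = 0
--     for x in current:
--         if any(x in s for s in other_models):
--             shared += 1
--         else:
--             unique += 1
--     return shared, unique
-- ===== Notes on version B (the rewrite author's own statement) =====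
-- stated objective: simpler
-- what changed: Replaced the set-algebra pipeline (build the union of all other models' sets, then take intersection and difference sizes) by a single loop over the current set that classifies each element with an any-membership test over the other sets, maintaining two counters; the empty-other-models special case disappears.
import Mathlib
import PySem

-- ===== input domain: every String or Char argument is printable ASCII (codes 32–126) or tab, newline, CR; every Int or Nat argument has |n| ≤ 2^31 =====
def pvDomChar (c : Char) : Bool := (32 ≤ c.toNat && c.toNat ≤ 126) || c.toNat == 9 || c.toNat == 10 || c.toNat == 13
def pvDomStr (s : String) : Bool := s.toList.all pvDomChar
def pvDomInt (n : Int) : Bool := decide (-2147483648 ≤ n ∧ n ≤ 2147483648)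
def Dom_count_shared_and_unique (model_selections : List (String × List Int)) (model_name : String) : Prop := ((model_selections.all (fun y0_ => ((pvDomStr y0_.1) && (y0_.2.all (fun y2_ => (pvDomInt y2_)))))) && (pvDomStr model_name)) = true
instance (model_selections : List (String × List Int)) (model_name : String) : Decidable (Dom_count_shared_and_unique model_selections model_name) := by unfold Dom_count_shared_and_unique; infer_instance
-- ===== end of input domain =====

-- B replaces A's union/intersection/difference set algebra by one counting loop over the
-- current set with an any-membership test against the other models' sets (objective: simpler).

-- ===== PORT A =====
def count_shared_and_unique (model_selections : List (String × List Int)) (model_name : String) : Int × Int :=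
  let d := PySem.Dict.ofList model_selections
  let current : PySem.Set Int := PySem.Set.ofList (d.getD model_name [])
  let other_models : List (PySem.Set Int) :=
    (d.items.filter (fun p => p.1 != model_name)).map (fun p => PySem.Set.ofList p.2)
  if other_models = [] then (0, PySem.Set.len current)
  else
    let all_others : PySem.Set Int :=
      other_models.foldl (fun acc s => PySem.Set.union acc s) PySem.Set.empty
    (PySem.Set.len (PySem.Set.inter current all_others),
     PySem.Set.len (PySem.Set.diff current all_others))

-- ===== PORT B =====
def count_shared_and_unique_alt (model_selections : List (String × List Int)) (model_name : String) : Int × Int :=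
  let d := PySem.Dict.ofList model_selections
  let current : PySem.Set Int := PySem.Set.ofList (d.getD model_name [])
  let other_models : List (PySem.Set Int) :=
    (d.items.filter (fun p => p.1 != model_name)).map (fun p => PySem.Set.ofList p.2)
  current.foldl
    (fun (acc : Int × Int) x =>
      if other_models.any (fun s => PySem.Set.contains s x) then (acc.1 + 1, acc.2)
      else (acc.1, acc.2 + 1))
    (0, 0)

-- ===== PRECONDITION & SPEC =====
-- Pre_ excludes exactly the inputs where model_name is not a key: there the Python A
-- (and B alike) raises KeyError at model_selections[model_name].
def Pre_count_shared_and_unique (model_selections : List (String × List Int)) (model_name : String) : Prop :=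
  model_name ∈ model_selections.map Prod.fst
instance (model_selections : List (String × List Int)) (model_name : String) : Decidable (Pre_count_shared_and_unique model_selections model_name) := by unfold Pre_count_shared_and_unique; infer_instance

def pvWitness_count_shared_and_unique : (List (String × List Int)) × String :=
  ([("m", [1, 2, 3]), ("n", [2, 4]), ("o", [3])], "m")

def Spec_count_shared_and_unique (model_selections : List (String × List Int)) (model_name : String) (out : Int × Int) : Prop := out = count_shared_and_unique_alt model_selections model_name
instance (model_selections : List (String × List Int)) (model_name : String) (out : Int × Int) : Decidable (Spec_count_shared_and_unique model_selections model_name out) := by unfold Spec_count_shared_and_unique; infer_instance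

-- ===== CLAIM (what is proved, stated in full; the proofs are below) =====
def Claim_equal_count_shared_and_unique : Prop := ∀ (model_selections : List (String × List Int)) (model_name : String), Dom_count_shared_and_unique model_selections model_name → Pre_count_shared_and_unique model_selections model_name → Spec_count_shared_and_unique model_selections model_name (count_shared_and_unique model_selections model_name)

-- ===== LEMMAS AND PROOFS =====

-- B's counting loop, characterised: it adds countP of the test to the first component
-- and countP of its negation to the second.
theorem pv_foldl_count {p : Int → Bool} (l : List Int) (a b : Int) :
    l.foldl (fun (acc : Int × Int) x => if p x then (acc.1 + 1, acc.2) else (acc.1, acc.2 + 1)) (a, b)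
      = (a + l.countP p, b + l.countP (fun x => !p x)) := by
  induction l generalizing a b with
  | nil => simp
  | cons y l ih =>
    by_cases h : p y = true <;>
      simp [List.foldl_cons, h, ih] <;> ring

-- Membership in A's folded union of the other models' sets.
theorem pv_mem_foldl_union {α : Type} [BEq α] [LawfulBEq α] (l : List (PySem.Set α)) (acc : PySem.Set α) (x : α) :
    x ∈ l.foldl (fun acc s => PySem.Set.union acc s) acc ↔ x ∈ acc ∨ ∃ s ∈ l, x ∈ s := by
  induction l generalizing acc with
  | nil => simp
  | cons t l ih =>
    rw [List.foldl_cons, ih]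
    simp [PySem.Set.union, PySem.Set.mem_update, or_assoc]

-- The two algorithms agree for ANY current set and list of other sets.
theorem pv_core_eq (current : PySem.Set Int) (others : List (PySem.Set Int)) :
    (if others = [] then ((0 : Int), PySem.Set.len current)
     else
       (PySem.Set.len (PySem.Set.inter current (others.foldl (fun acc s => PySem.Set.union acc s) PySem.Set.empty)),
        PySem.Set.len (PySem.Set.diff current (others.foldl (fun acc s => PySem.Set.union acc s) PySem.Set.empty))))
      = current.foldl
          (fun (acc : Int × Int) x =>
            if others.any (fun s => PySem.Set.contains s x) then (acc.1 + 1, acc.2)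
            else (acc.1, acc.2 + 1))
          (0, 0) := by
  rw [pv_foldl_count (p := fun x => others.any (fun s => PySem.Set.contains s x)) current 0 0]
  have hmem : ∀ x : Int,
      (others.foldl (fun acc s => PySem.Set.union acc s) PySem.Set.empty).contains x
        = others.any (fun s => PySem.Set.contains s x) := by
    intro x
    rw [Bool.eq_iff_iff, PySem.Set.contains_iff, pv_mem_foldl_union]
    simp [PySem.Set.empty, List.any_eq_true]
  by_cases h : others = []
  · subst h
    simp [PySem.Set.len]
  · rw [if_neg h]
    refine Prod.ext ?_ ?_
    · simp only [PySem.Set.len, PySem.Set.inter, Int.zero_add, Int.natCast_inj]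
      rw [← List.countP_eq_length_filter]
      apply List.countP_congr
      intro x _
      rw [hmem x]
    · simp only [PySem.Set.len, PySem.Set.diff, Int.zero_add, Int.natCast_inj]
      rw [← List.countP_eq_length_filter]
      apply List.countP_congr
      intro x _
      rw [hmem x]

theorem count_shared_and_unique_eq (model_selections : List (String × List Int)) (model_name : String) :
    count_shared_and_unique model_selections model_name
      = count_shared_and_unique_alt model_selections model_name := by
  simp only [count_shared_and_unique, count_shared_and_unique_alt]
  exact pv_core_eq _ _

-- ===== VERDICT (by name: the statement is the Claim_ definition above) =====
theorem count_shared_and_unique_spec : Claim_equal_count_shared_and_unique := by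
  intro ms name _ _
  unfold Spec_count_shared_and_unique
  exact count_shared_and_unique_eq ms name
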